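-- pv_equiv track=rewrite | github.com/WFZENB/Code_RS | rs.py | mul_pol_mat
-- ===== SOURCE A (Python) =====
-- a = (0b100, 0b010, 0b001, 0b110, 0b011, 0b111, 0b101)
--
-- def get_a(p):
--     return a[p % len(a)]
--
-- def gf_mul(a1, a2):
--     if a1 == 0 or a2 == 0:
--         return 0
--     return get_a(a.index(a1) + a.index(a2))
--
-- def mul_pol_mat(pl, mx):
--     pol = []
--
--     for i in range(len(mx[0])):
--         ls = 0
--         for j in range(len(mx)):
--             ls ^= gf_mul(pl[j], mx[j][i])
--         pol.append(ls)
--     return pol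
-- ===== SOURCE B (Python) =====
-- a = (0b100, 0b010, 0b001, 0b110, 0b011, 0b111, 0b101)
--
-- LOG = {v: i for i, v in enumerate(a)}
--
-- def mul_pol_mat(pl, mx):
--     pol = [0] * len(mx[0])
--     for x, row in zip(pl, mx):
--         if x == 0:
--             continue
--         pol = [p ^ (a[(LOG[x] + LOG[v]) % 7] if v else 0) for p, v in zip(pol, row)]
--     return pol
-- ===== Notes on version B (the rewrite author's own statement) =====
-- stated objective: alternative
-- what changed: B replaces A's column-outer nested scan (a fresh scalar per column, with two list.index scans inside every gf_mul call) by a row-outer linear combination: it precomputes a log dictionary once and folds each row into a persistent result vector, skipping zero coefficients.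
import Mathlib
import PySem

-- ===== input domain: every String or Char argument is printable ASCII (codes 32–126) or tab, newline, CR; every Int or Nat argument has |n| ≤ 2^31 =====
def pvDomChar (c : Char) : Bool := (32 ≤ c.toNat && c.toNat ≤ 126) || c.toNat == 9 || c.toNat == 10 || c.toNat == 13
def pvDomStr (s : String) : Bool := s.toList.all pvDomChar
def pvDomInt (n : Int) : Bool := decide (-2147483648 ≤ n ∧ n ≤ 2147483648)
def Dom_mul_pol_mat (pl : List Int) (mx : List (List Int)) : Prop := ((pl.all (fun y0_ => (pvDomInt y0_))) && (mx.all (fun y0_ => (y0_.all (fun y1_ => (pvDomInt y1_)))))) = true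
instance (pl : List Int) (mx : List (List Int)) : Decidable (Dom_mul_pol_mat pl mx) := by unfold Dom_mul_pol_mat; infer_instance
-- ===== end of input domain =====

-- B replaces A's column-at-a-time nested scan (with list.index scans inside gf_mul) by a row-outer
-- linear-combination accumulating the whole result vector, with a precomputed log dictionary; objective: alternative.

-- ===== PORT A =====
-- the GF(8) exp table `a`
def aTable : List Int := [4, 2, 1, 6, 3, 7, 5]

def get_a (p : Int) : Int :=
  PySem.List.pyGetD aTable (PySem.Int.mod p (aTable.length : Int)) 0

def gf_mul (a1 a2 : Int) : Int :=
  if a1 = 0 ∨ a2 = 0 then 0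
  else
    match PySem.List.index? aTable a1, PySem.List.index? aTable a2 with
    | some i, some j => get_a ((i : Int) + (j : Int))
    | _, _ => 0  -- Python raises ValueError here (a.index of a value not in the table); excluded by Pre_

def mul_pol_mat (pl : List Int) (mx : List (List Int)) : List Int :=
  (List.range (PySem.List.pyGetD mx 0 []).length).foldl
    (fun pol (i : Nat) =>
      pol ++ [(List.range mx.length).foldl
        (fun ls (j : Nat) => PySem.Int.bxor ls
          (gf_mul (PySem.List.pyGetD pl (j : Int) 0)
                  (PySem.List.pyGetD (PySem.List.pyGetD mx (j : Int) []) (i : Int) 0))) 0])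
    []

-- ===== PORT B =====
-- LOG = {v: i for i, v in enumerate(a)}
def logTable : PySem.Dict Int Int :=
  PySem.Dict.ofList [(4, 0), (2, 1), (1, 2), (6, 3), (3, 4), (7, 5), (5, 6)]

def mul_pol_mat_alt (pl : List Int) (mx : List (List Int)) : List Int :=
  (pl.zip mx).foldl
    (fun pol xr =>
      if xr.1 = 0 then pol
      else
        (pol.zip xr.2).map (fun pv =>
          PySem.Int.bxor pv.1
            (if pv.2 ≠ 0 then
              PySem.List.pyGetD aTable
                (PySem.Int.mod (logTable.getD xr.1 0 + logTable.getD pv.2 0) 7) 0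
             else 0)))
    (List.replicate (PySem.List.pyGetD mx 0 []).length 0)

-- ===== PRECONDITION & SPEC =====
-- Pre_ = exactly where Python A returns: mx nonempty (mx[0]), pl at least as long as mx (pl[j]),
-- every row at least as long as mx[0] (mx[j][i]), and each multiplied pair is zero or inside the
-- 7-element field table (else a.index raises ValueError).
def Pre_mul_pol_mat (pl : List Int) (mx : List (List Int)) : Prop :=
  mx ≠ [] ∧
  (mx.headI.length = 0 ∨
    (mx.length ≤ pl.length ∧
     (∀ row ∈ mx, mx.headI.length ≤ row.length) ∧
     (∀ p ∈ pl.zip mx, ∀ x ∈ p.2.take mx.headI.length,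
       p.1 = 0 ∨ x = 0 ∨ (1 ≤ p.1 ∧ p.1 ≤ 7 ∧ 1 ≤ x ∧ x ≤ 7))))
instance (pl : List Int) (mx : List (List Int)) : Decidable (Pre_mul_pol_mat pl mx) := by
  unfold Pre_mul_pol_mat; infer_instance

def pvWitness_mul_pol_mat : List Int × List (List Int) := ([1, 2, 3], [[1, 2], [3, 4], [5, 6]])

def Spec_mul_pol_mat (pl : List Int) (mx : List (List Int)) (out : List Int) : Prop := out = mul_pol_mat_alt pl mx
instance (pl : List Int) (mx : List (List Int)) (out : List Int) : Decidable (Spec_mul_pol_mat pl mx out) := by unfold Spec_mul_pol_mat; infer_instance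

-- ===== CLAIM (what is proved, stated in full; the proofs are below) =====
def Claim_equal_mul_pol_mat : Prop := ∀ (pl : List Int) (mx : List (List Int)), Dom_mul_pol_mat pl mx → Pre_mul_pol_mat pl mx → Spec_mul_pol_mat pl mx (mul_pol_mat pl mx)

-- ===== LEMMAS AND PROOFS =====

-- A's inner column sum over the first k rows
def colVal (pl : List Int) (mx : List (List Int)) (k : Nat) (i : Nat) : Int :=
  (List.range k).foldl
    (fun ls (j : Nat) => PySem.Int.bxor ls
      (gf_mul (PySem.List.pyGetD pl (j : Int) 0)
              (PySem.List.pyGetD (PySem.List.pyGetD mx (j : Int) []) (i : Int) 0))) 0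

theorem cols_eq (mx : List (List Int)) : (PySem.List.pyGetD mx 0 []).length = mx.headI.length := by
  cases mx with
  | nil => simp [PySem.List.pyGetD_zero]; rfl
  | cons h t => simp [PySem.List.pyGetD_zero]

theorem mulA_eq (pl : List Int) (mx : List (List Int)) :
    mul_pol_mat pl mx = (List.range mx.headI.length).map (fun i => colVal pl mx mx.length i) := by
  unfold mul_pol_mat
  rw [PySem.List.foldl_append_singleton_eq_map, cols_eq]
  simp only [List.nil_append]
  rfl

theorem colVal_succ (pl : List Int) (mx : List (List Int)) (k i : Nat) :
    colVal pl mx (k + 1) i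
      = PySem.Int.bxor (colVal pl mx k i) (gf_mul (pl.getD k 0) ((mx.getD k []).getD i 0)) := by
  simp [colVal, List.range_succ, List.getD_eq_getElem?_getD]

theorem zip_map_range (m : Nat) (row : List Int) (g : Nat → Int) (h : m ≤ row.length) :
    ((List.range m).map g).zip row = (List.range m).map (fun i => (g i, row.getD i 0)) := by
  apply List.ext_getElem
  · simp [Nat.min_eq_left h]
  · intro i h1 h2
    have hi : i < m := by simpa using h2
    simp [List.getElem_zip, List.getD_eq_getElem?_getD, List.getElem?_eq_getElem (by omega : i < row.length)]

theorem gf_elem_eq (x v : Int) (hx : x ≠ 0)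
    (h : x = 0 ∨ v = 0 ∨ (1 ≤ x ∧ x ≤ 7 ∧ 1 ≤ v ∧ v ≤ 7)) :
    (if v ≠ 0 then
        PySem.List.pyGetD aTable (PySem.Int.mod (logTable.getD x 0 + logTable.getD v 0) 7) 0
      else 0) = gf_mul x v := by
  rcases h with h | h | ⟨h1, h2, h3, h4⟩
  · exact absurd h hx
  · simp [h, gf_mul]
  · have hv : v ≠ 0 := by omega
    interval_cases x <;> interval_cases v <;> decide

theorem B_partial (pl : List Int) (mx : List (List Int))
    (hlen : mx.length ≤ pl.length)
    (hrow : ∀ row ∈ mx, mx.headI.length ≤ row.length)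
    (hval : ∀ p ∈ pl.zip mx, ∀ x ∈ p.2.take mx.headI.length,
      p.1 = 0 ∨ x = 0 ∨ (1 ≤ p.1 ∧ p.1 ≤ 7 ∧ 1 ≤ x ∧ x ≤ 7)) :
    ∀ k, k ≤ mx.length →
      ((pl.zip mx).take k).foldl
        (fun pol xr =>
          if xr.1 = 0 then pol
          else
            (pol.zip xr.2).map (fun pv =>
              PySem.Int.bxor pv.1
                (if pv.2 ≠ 0 then
                  PySem.List.pyGetD aTable
                    (PySem.Int.mod (logTable.getD xr.1 0 + logTable.getD pv.2 0) 7) 0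
                 else 0)))
        (List.replicate mx.headI.length 0)
      = (List.range mx.headI.length).map (fun i => colVal pl mx k i) := by
  intro k
  induction k with
  | zero =>
    intro _
    simp [colVal, List.map_const']
  | succ k ih =>
    intro hk1
    have hk : k < mx.length := by omega
    have hzlen : (pl.zip mx).length = mx.length := by
      simp [List.length_zip, Nat.min_eq_right hlen]
    have hkz : k < (pl.zip mx).length := by omega
    rw [List.take_add_one, List.getElem?_eq_getElem hkz]
    simp only [Option.toList_some]
    rw [List.foldl_append, ih (by omega)]
    rw [List.foldl_cons, List.foldl_nil]
    have hget : (pl.zip mx)[k] = (pl[k]'(by omega), mx[k]'hk) := List.getElem_zip ..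
    rw [hget]
    have hplk : pl.getD k 0 = pl[k]'(by omega) := by
      rw [List.getD_eq_getElem?_getD, List.getElem?_eq_getElem (by omega)]; rfl
    have hmxk : mx.getD k [] = mx[k]'hk := by
      rw [List.getD_eq_getElem?_getD, List.getElem?_eq_getElem hk]; rfl
    by_cases hx : pl[k]'(by omega) = 0
    · rw [if_pos (by simpa using hx)]
      apply List.map_congr_left
      intro i hi
      rw [colVal_succ]
      have h0 : pl[k]?.getD 0 = 0 := by
        rw [List.getElem?_eq_getElem (show k < pl.length by omega)]; simpa using hx
      simp [gf_mul, h0]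
    · rw [if_neg (by simpa using hx)]
      have hrl : mx.headI.length ≤ (mx[k]'hk).length := hrow _ (List.getElem_mem hk)
      rw [zip_map_range _ _ _ hrl]
      rw [List.map_map]
      apply List.map_congr_left
      intro i hi
      have him : i < mx.headI.length := by simpa using hi
      have hvmem : (mx[k]'hk).getD i 0 ∈ (mx[k]'hk).take mx.headI.length := by
        have hig : ((mx[k]'hk).take mx.headI.length)[i]'(by
            simp [Nat.min_eq_left hrl]; omega) = (mx[k]'hk).getD i 0 := by
          rw [List.getElem_take, List.getD_eq_getElem?_getD,
            List.getElem?_eq_getElem (by omega : i < (mx[k]'hk).length)]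
          rfl
        exact hig ▸ List.getElem_mem _
      have hv := hval _ (List.mem_of_getElem hget) _ hvmem
      simp only [colVal_succ, hplk, hmxk, Function.comp_apply]
      rw [gf_elem_eq _ _ hx hv]

theorem B_foldl_nil (l : List (Int × List Int)) :
    l.foldl
      (fun pol xr =>
        if xr.1 = 0 then pol
        else
          (pol.zip xr.2).map (fun pv =>
            PySem.Int.bxor pv.1
              (if pv.2 ≠ 0 then
                PySem.List.pyGetD aTable
                  (PySem.Int.mod (logTable.getD xr.1 0 + logTable.getD pv.2 0) 7) 0
               else 0)))
      ([] : List Int) = [] := by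
  induction l with
  | nil => rfl
  | cons x l ih => simp only [List.foldl_cons]; split_ifs <;> simpa using ih

-- ===== VERDICT (by name: the statement is the Claim_ definition above) =====
theorem mul_pol_mat_spec : Claim_equal_mul_pol_mat := by
  intro pl mx _ hpre
  obtain ⟨hne, hcols | ⟨hlen, hrow, hval⟩⟩ := hpre
  · unfold Spec_mul_pol_mat
    rw [mulA_eq, mul_pol_mat_alt, cols_eq, hcols]
    simp only [List.range_zero, List.map_nil, List.replicate_zero]
    exact (B_foldl_nil _).symm
  unfold Spec_mul_pol_mat
  have hzlen : (pl.zip mx).length = mx.length := by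
    simp [List.length_zip, Nat.min_eq_right hlen]
  have := B_partial pl mx hlen hrow hval mx.length (le_refl _)
  rw [List.take_of_length_le (by omega)] at this
  rw [mulA_eq, mul_pol_mat_alt, cols_eq, this]
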